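-- pv_equiv track=rewrite | github.com/agloveduck/read-paper-chi21adaptive-main | menu_adapt/pump.py | simplify_menu
-- ===== SOURCE A (Python) =====
-- def simplify_menu(menu): # 函数用于简化菜单，去除重复的分隔符，并确保菜单以分隔符开头和结尾
--     separator = "----"
--     simplified_menu = []
--     for i in range (0,len(menu)):
--         if menu[i] != separator:
--             simplified_menu.append(menu[i])
--             continue
--         if menu[i] == separator and len(simplified_menu)>0:
--             if simplified_menu[-1] == separator: continue
--             simplified_menu.append(menu[i])
--     if simplified_menu[0] == separator:
--             del simplified_menu[0]
--     if simplified_menu[-1] == separator: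
--             del simplified_menu[-1]
--     num_additional_separators = len(menu) - len(simplified_menu)
--     for _ in range(num_additional_separators): simplified_menu.append(separator)
--     return simplified_menu
--
-- separator = "----"
-- ===== SOURCE B (Python) =====
-- def simplify_menu(menu):
--     separator = "----"
--     # run-length decomposition: walk maximal runs of equal elements; a run of
--     # separators contributes a single separator, any other run is kept whole
--     collapsed = []
--     i = 0
--     while i < len(menu):
--         j = i
--         while j < len(menu) and menu[j] == menu[i]:
--             j += 1
--         if menu[i] == separator:
--             collapsed.append(separator)
--         else:
--             collapsed.extend(menu[i:j])
--         i = j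
--     if collapsed[0] == separator:
--         del collapsed[0]
--     if collapsed[-1] == separator:
--         del collapsed[-1]
--     return collapsed + [separator] * (len(menu) - len(collapsed))
-- ===== Notes on version B (the rewrite author's own statement) =====
-- stated objective: alternative
-- what changed: Replaces A's per-element loop (which inspects the accumulator's last entry to decide whether to append a separator) by a run-length decomposition: an outer loop over maximal runs of equal elements that emits one separator per separator run and whole non-separator runs, then strips one leading and one trailing separator (A's leading strip never fires; B's does) and pads.
import Mathlib
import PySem

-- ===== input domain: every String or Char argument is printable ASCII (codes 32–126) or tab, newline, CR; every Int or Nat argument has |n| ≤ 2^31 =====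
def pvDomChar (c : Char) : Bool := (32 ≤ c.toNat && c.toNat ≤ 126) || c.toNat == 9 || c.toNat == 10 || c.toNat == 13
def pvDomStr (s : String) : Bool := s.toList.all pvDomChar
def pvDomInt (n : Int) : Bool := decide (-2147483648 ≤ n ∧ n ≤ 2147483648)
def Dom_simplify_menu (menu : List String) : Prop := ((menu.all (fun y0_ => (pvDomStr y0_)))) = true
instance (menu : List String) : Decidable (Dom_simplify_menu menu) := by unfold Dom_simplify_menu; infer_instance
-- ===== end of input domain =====

-- B collapses separator runs by a run-length decomposition (loop over maximal runs)
-- instead of A's per-element accumulator-inspecting loop (objective: alternative);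
-- return values agree on all of Pre_.

-- ===== PORT A =====
def simplify_menu (menu : List String) : List String :=
  let separator := "----"
  let simplified :=
    (PySem.List.pyRange 0 (menu.length : Int) 1).foldl (fun acc i =>
      let x := PySem.List.pyGetD menu i ""
      if x ≠ separator then acc ++ [x]
      else if acc.length > 0 then
        if PySem.List.pyGetD acc (-1) "" = separator then acc
        else acc ++ [x]
      else acc) []
  let simplified2 :=
    if PySem.List.pyGetD simplified 0 "" = separator then simplified.drop 1 else simplified
  let simplified3 :=
    if PySem.List.pyGetD simplified2 (-1) "" = separator then simplified2.take (simplified2.length - 1)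
    else simplified2
  simplified3 ++ List.replicate ((menu.length : Int) - (simplified3.length : Int)).toNat separator

-- ===== PORT B =====
-- B's outer while loop over maximal runs: one separator per separator run,
-- non-separator runs kept whole; recursion on the remaining suffix = advancing i to j
def collapseRuns : List String → List String
  | [] => []
  | x :: xs =>
      (if x = "----" then ["----"] else x :: xs.takeWhile (· == x))
        ++ collapseRuns (xs.dropWhile (· == x))
termination_by xs => xs.length
decreasing_by
  simpa using Nat.lt_succ_of_le (List.length_dropWhile_le (· == x) xs)

def simplify_menu_alt (menu : List String) : List String :=
  let separator := "----"
  let collapsed := collapseRuns menu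
  let collapsed1 :=
    if PySem.List.pyGetD collapsed 0 "" = separator then collapsed.drop 1 else collapsed
  let collapsed2 :=
    if PySem.List.pyGetD collapsed1 (-1) "" = separator then collapsed1.take (collapsed1.length - 1)
    else collapsed1
  collapsed2 ++ List.replicate ((menu.length : Int) - (collapsed2.length : Int)).toNat separator

-- ===== PRECONDITION & SPEC =====
-- Pre_ excludes exactly the menus with no non-separator entry (empty or all "----"),
-- on which the Python A raises IndexError (and the Python B raises IndexError too).
def Pre_simplify_menu (menu : List String) : Prop := ∃ x ∈ menu, x ≠ "----"
instance (menu : List String) : Decidable (Pre_simplify_menu menu) := by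
  unfold Pre_simplify_menu; infer_instance
def pvWitness_simplify_menu : List String := ["File"]

def Spec_simplify_menu (menu : List String) (out : List String) : Prop := out = simplify_menu_alt menu
instance (menu : List String) (out : List String) : Decidable (Spec_simplify_menu menu out) := by unfold Spec_simplify_menu; infer_instance

-- ===== CLAIM (what is proved, stated in full; the proofs are below) =====
def Claim_equal_simplify_menu : Prop := ∀ (menu : List String), Dom_simplify_menu menu → Pre_simplify_menu menu → Spec_simplify_menu menu (simplify_menu menu)

-- ===== LEMMAS AND PROOFS =====

-- canonical collapse: drop an element iff it and its predecessor (p for the head) are both "----"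
def bcol (p : String) : List String → List String
  | [] => []
  | x :: xs => if x = "----" ∧ p = "----" then bcol x xs else x :: bcol x xs

-- bcol ignores its first argument except for whether it equals "----"
theorem bcol_p_ne (p : String) (hp : p ≠ "----") (zs : List String) :
    bcol p zs = bcol "" zs := by
  cases zs with
  | nil => rfl
  | cons z zs => simp [bcol, hp]

-- bcol after a separator drops the whole leading separator run
theorem bcol_sep_dropWhile (xs : List String) :
    bcol "----" xs = bcol "" (xs.dropWhile (· == "----")) := by
  induction xs with
  | nil => rfl
  | cons x xs ih =>
    by_cases hx : x = "----"
    · simpa [bcol, hx] using ih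
    · simp [bcol, hx, bcol_p_ne x hx xs]

-- a non-separator run is kept whole by bcol
theorem bcol_run (x : String) (hx : x ≠ "----") (xs : List String) :
    bcol x xs = xs.takeWhile (· == x) ++ bcol "" (xs.dropWhile (· == x)) := by
  induction xs with
  | nil => rfl
  | cons y ys ih =>
    by_cases hy : y = x
    · subst hy
      simp [bcol, hx, ih]
    · have : (y == x) = false := by simp [hy]
      simp [this, bcol_p_ne x hx (y :: ys)]

-- B's run-length loop computes bcol with a non-separator seed
theorem collapseRuns_eq_bcol (xs : List String) : collapseRuns xs = bcol "" xs := by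
  induction hn : xs.length using Nat.strong_induction_on generalizing xs with
  | _ n ih =>
    cases xs with
    | nil => simp [collapseRuns, bcol]
    | cons x xs =>
      have hd : (xs.dropWhile (· == x)).length < n := by
        subst hn
        simpa using Nat.lt_succ_of_le (List.length_dropWhile_le (· == x) xs)
      have ihd := ih _ hd (xs.dropWhile (· == x)) rfl
      by_cases hx : x = "----"
      · subst hx
        rw [collapseRuns, if_pos rfl, ihd]
        show "----" :: bcol "" (xs.dropWhile (· == "----")) = bcol "" ("----" :: xs)
        simp [bcol, bcol_sep_dropWhile]
      · rw [collapseRuns, if_neg hx, ihd]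
        show (x :: xs.takeWhile (· == x)) ++ bcol "" (xs.dropWhile (· == x)) = bcol "" (x :: xs)
        simp [bcol, hx, bcol_run x hx xs]

-- A's loop body, as it appears after the pyRange/pyGetD bridge
def astep (acc : List String) (x : String) : List String :=
  if x ≠ "----" then acc ++ [x]
  else if acc.length > 0 then
    if PySem.List.pyGetD acc (-1) "" = "----" then acc
    else acc ++ [x]
  else acc

-- loop invariant: p records whether the accumulator is empty or ends in a separator
theorem afold_eq_bcol (xs : List String) : ∀ (acc : List String) (p : String),
    (p = "----" ↔ (acc = [] ∨ acc.getLast? = some "----")) →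
    xs.foldl astep acc = acc ++ bcol p xs := by
  induction xs with
  | nil => intro acc p _; simp [bcol]
  | cons x xs ih =>
    intro acc p h
    rw [List.foldl_cons]
    by_cases hx : x = "----"
    · subst hx
      by_cases hp : p = "----"
      · have hd : bcol p ("----" :: xs) = bcol "----" xs := by simp [bcol, hp]
        rw [hd]
        rcases h.mp hp with ha | ha
        · subst ha
          have hstep : astep [] "----" = [] := by simp [astep]
          rw [hstep]
          simpa using ih [] "----" (by simp)
        · have hacc : acc ≠ [] := by rintro rfl; simp at ha
          have hget : PySem.List.pyGetD acc (-1) "" = "----" := by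
            rw [PySem.List.pyGetD_neg_one acc "" hacc]
            have := List.getLast?_eq_some_getLast hacc
            rw [this] at ha
            exact Option.some.inj ha
          have hstep : astep acc "----" = acc := by
            simp [astep, List.length_pos_iff.mpr hacc, hget]
          rw [hstep]
          exact ih acc "----" (by simp [ha])
      · have hno : ¬ (acc = [] ∨ acc.getLast? = some "----") := fun hc => hp (h.mpr hc)
        obtain ⟨hacc, hlast⟩ := not_or.mp hno
        have hget : PySem.List.pyGetD acc (-1) "" ≠ "----" := by
          rw [PySem.List.pyGetD_neg_one acc "" hacc]
          intro hc
          exact hlast (by rw [List.getLast?_eq_some_getLast hacc, hc])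
        have hstep : astep acc "----" = acc ++ ["----"] := by
          simp [astep, List.length_pos_iff.mpr hacc, hget]
        rw [hstep]
        have hd : bcol p ("----" :: xs) = "----" :: bcol "----" xs := by
          simp [bcol, hp]
        rw [hd, ih (acc ++ ["----"]) "----" (by simp)]
        simp
    · have hstep : astep acc x = acc ++ [x] := by simp [astep, hx]
      rw [hstep]
      have hd : bcol p (x :: xs) = x :: bcol x xs := by simp [bcol, hx]
      rw [hd, ih (acc ++ [x]) x (iff_of_false hx (by simp [hx]))]
      simp

-- the collapsed list never starts with a separator, so A's leading-separator check never fires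
theorem bcol_head_ne (xs : List String) :
    ∀ h, (bcol "----" xs).head? = some h → h ≠ "----" := by
  induction xs with
  | nil => simp [bcol]
  | cons x xs ih =>
    by_cases hx : x = "----"
    · simpa [bcol, hx] using ih
    · intro h hh
      simp [bcol, hx] at hh
      simpa [← hh] using hx

-- B's leading-separator strip turns its run-collapse into A's collapse
theorem bcol_strip_leading (menu : List String) :
    (if PySem.List.pyGetD (bcol "" menu) 0 "" = "----" then (bcol "" menu).drop 1
     else bcol "" menu) = bcol "----" menu := by
  cases menu with
  | nil => simp [bcol, PySem.List.pyGetD]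
  | cons x xs =>
    by_cases hx : x = "----"
    · subst hx
      have h0 : bcol "" ("----" :: xs) = "----" :: bcol "----" xs := by simp [bcol]
      have h1 : bcol "----" ("----" :: xs) = bcol "----" xs := by simp [bcol]
      rw [h0, h1, PySem.List.pyGetD_zero_cons, if_pos rfl]
      rfl
    · have h0 : bcol "" (x :: xs) = x :: bcol x xs := by simp [bcol, hx]
      have h1 : bcol "----" (x :: xs) = x :: bcol x xs := by simp [bcol, hx]
      rw [h0, h1, PySem.List.pyGetD_zero_cons, if_neg hx]

-- ===== VERDICT (by name: the statement is the Claim_ definition above) =====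
theorem simplify_menu_spec : Claim_equal_simplify_menu := by
  intro menu _ _
  unfold Spec_simplify_menu simplify_menu simplify_menu_alt
  simp only []
  have h1 := PySem.List.foldl_pyRange_zero_pyGetD' menu "" astep []
  rw [afold_eq_bcol menu [] "----" (by simp), List.nil_append] at h1
  simp only [astep] at h1
  rw [h1]
  have hhead : ¬ PySem.List.pyGetD (bcol "----" menu) 0 "" = "----" := by
    cases hb : bcol "----" menu with
    | nil => decide
    | cons h t =>
      rw [PySem.List.pyGetD_zero_cons h t ""]
      exact bcol_head_ne menu h (by rw [hb]; rfl)
  rw [if_neg hhead, collapseRuns_eq_bcol, bcol_strip_leading]
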